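-- pv_equiv track=rewrite | github.com/carlzimmerman/zimmerman-formula | extended_research/biotech/medicine/validated_pipeline/emp_04_sidechain_z2_isolation.py | is_sidechain_atom
-- ===== SOURCE A (Python) =====
-- BACKBONE_ATOMS = {'N', 'CA', 'C', 'O', 'OXT', 'H', 'HA', 'HN'}
--
-- SIDECHAIN_PREFIXES = {'CB', 'CG', 'CD', 'CE', 'CZ', 'CH', 'NE', 'NZ', 'NH',
--                        'OD', 'OE', 'OG', 'OH', 'SD', 'SG', 'ND', 'NE1', 'NE2',
--                        'OD1', 'OD2', 'OE1', 'OE2', 'OG1', 'OH', 'CG1', 'CG2',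
--                        'CD1', 'CD2', 'CE1', 'CE2', 'CE3', 'CZ2', 'CZ3', 'CH2'}
--
-- def is_sidechain_atom(atom_name: str) -> bool:
--     """Check if an atom is a side-chain atom (not backbone)."""
--     atom_name = atom_name.strip().upper()
--
--     # Explicitly exclude backbone
--     if atom_name in BACKBONE_ATOMS:
--         return False
--
--     # Hydrogen atoms on backbone
--     if atom_name.startswith('H') and len(atom_name) <= 2:
--         return False
--
--     # Side-chain atoms start with these
--     for prefix in SIDECHAIN_PREFIXES:
--         if atom_name.startswith(prefix):
--             return True
--
--     # CB is always side-chain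
--     if atom_name == 'CB':
--         return True
--
--     # Other heavy atoms that aren't backbone
--     if atom_name[0] in 'CNOS' and atom_name not in BACKBONE_ATOMS:
--         return True
--
--     return False
-- ===== SOURCE B (Python) =====
-- BACKBONE_ATOMS = {'N', 'CA', 'C', 'O', 'OXT', 'H', 'HA', 'HN'}
--
-- def is_sidechain_atom(atom_name: str) -> bool:
--     """Check if an atom is a side-chain atom (not backbone)."""
--     atom_name = atom_name.strip().upper()
--     if atom_name in BACKBONE_ATOMS:
--         return False
--     if atom_name.startswith('H') and len(atom_name) <= 2:
--         return False
--     return atom_name[0] in 'CNOS'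
-- ===== Notes on version B (the rewrite author's own statement) =====
-- stated objective: simpler
-- what changed: B drops the 34-element SIDECHAIN_PREFIXES scan and A's redundant final equality check entirely: after the backbone and short-hydrogen exclusions it decides by a single first-character class test against the four heavy-atom letters, which subsumes every prefix.
import Mathlib
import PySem

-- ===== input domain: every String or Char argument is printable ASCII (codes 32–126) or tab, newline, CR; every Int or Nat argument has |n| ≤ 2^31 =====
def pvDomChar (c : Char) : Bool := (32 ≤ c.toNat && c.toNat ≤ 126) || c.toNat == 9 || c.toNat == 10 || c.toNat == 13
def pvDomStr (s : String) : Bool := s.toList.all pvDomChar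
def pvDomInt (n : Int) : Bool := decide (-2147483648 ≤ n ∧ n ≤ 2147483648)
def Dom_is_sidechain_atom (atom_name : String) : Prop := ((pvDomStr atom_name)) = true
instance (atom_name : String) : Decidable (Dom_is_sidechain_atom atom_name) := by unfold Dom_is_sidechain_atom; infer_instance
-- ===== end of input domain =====

-- B replaces A's 34-prefix scan and the redundant 'CB' check by a single first-character
-- class test (every prefix starts with a letter of 'CNOS'); objective: simpler.

-- ===== PORT A =====
def backboneAtoms : List String := ["N", "CA", "C", "O", "OXT", "H", "HA", "HN"]

def sidechainPrefixes : List String :=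
  ["CB", "CG", "CD", "CE", "CZ", "CH", "NE", "NZ", "NH",
   "OD", "OE", "OG", "OH", "SD", "SG", "ND", "NE1", "NE2",
   "OD1", "OD2", "OE1", "OE2", "OG1", "CG1", "CG2",
   "CD1", "CD2", "CE1", "CE2", "CE3", "CZ2", "CZ3", "CH2"]

def is_sidechain_atom (atom_name : String) : Bool :=
  let a := PySem.Str.upper (PySem.Str.strip atom_name)
  if backboneAtoms.contains a then false
  else if PySem.Str.startswith a "H" && decide (PySem.Str.len a ≤ 2) then false
  else if sidechainPrefixes.any (fun p => PySem.Str.startswith a p) then true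
  else if a == "CB" then true
  -- atom_name[0] in 'CNOS': indexing may raise (IndexError = none, excluded by Pre_)
  else if (match PySem.Str.pyGet? a 0 with
           | some c => "CNOS".toList.contains c
           | none => false) && !backboneAtoms.contains a then true
  else false

-- ===== PORT B =====
def is_sidechain_atom_alt (atom_name : String) : Bool :=
  let a := PySem.Str.upper (PySem.Str.strip atom_name)
  if backboneAtoms.contains a then false
  else if PySem.Str.startswith a "H" && decide (PySem.Str.len a ≤ 2) then false
  else match PySem.Str.pyGet? a 0 with
       | some c => "CNOS".toList.contains c
       | none => false

-- ===== PRECONDITION & SPEC =====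
-- Pre_ excludes exactly the inputs whose strip() is empty: there both Pythons raise
-- IndexError on atom_name[0].
def Pre_is_sidechain_atom (atom_name : String) : Prop := PySem.Str.strip atom_name ≠ ""
instance (atom_name : String) : Decidable (Pre_is_sidechain_atom atom_name) := by unfold Pre_is_sidechain_atom; infer_instance

def pvWitness_is_sidechain_atom : String := "CB"

def Spec_is_sidechain_atom (atom_name : String) (out : Bool) : Prop := out = is_sidechain_atom_alt atom_name
instance (atom_name : String) (out : Bool) : Decidable (Spec_is_sidechain_atom atom_name out) := by unfold Spec_is_sidechain_atom; infer_instance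

-- ===== CLAIM (what is proved, stated in full; the proofs are below) =====
def Claim_equal_is_sidechain_atom : Prop := ∀ (atom_name : String), Dom_is_sidechain_atom atom_name → Pre_is_sidechain_atom atom_name → Spec_is_sidechain_atom atom_name (is_sidechain_atom atom_name)

-- ===== LEMMAS AND PROOFS =====

-- every sidechain prefix is nonempty and starts with a letter of 'CNOS'
theorem prefixes_head_cnos :
    sidechainPrefixes.all (fun p => (p.toList.head?.elim false (fun c => "CNOS".toList.contains c))) = true := by
  decide

theorem startswith_false_of_head_ne (c : Char) (cs : List Char) (p : String)
    (hp : p ∈ sidechainPrefixes) (hc : ("CNOS".toList.contains c) = false) :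
    PySem.Str.startswith (String.ofList (c :: cs)) p = false := by
  have hall := List.all_eq_true.mp prefixes_head_cnos p hp
  by_contra h
  rw [Bool.not_eq_false] at h
  have hsw : p.toList <+: (c :: cs) := by
    have h2 := (PySem.Chars.startswith_iff (s := (String.ofList (c :: cs)).toList) (p := p.toList)).mp
      (by simpa [PySem.Str.startswith_eq] using h)
    simpa using h2
  cases hpl : p.toList with
  | nil => simp [hpl] at hall
  | cons p0 ps =>
    rw [hpl] at hsw hall
    obtain ⟨h1, -⟩ := List.cons_prefix_cons.mp hsw
    simp only [List.head?_cons, Option.elim_some] at hall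
    rw [h1] at hall
    rw [hall] at hc
    simp at hc

theorem tail_eq (t : String) (hbb : backboneAtoms.contains t = false) :
    (if sidechainPrefixes.any (fun p => PySem.Str.startswith t p) then true
     else if t == "CB" then true
     else if (match PySem.Str.pyGet? t 0 with
              | some c => "CNOS".toList.contains c
              | none => false) && !backboneAtoms.contains t then true
     else false)
    = (match PySem.Str.pyGet? t 0 with
       | some c => "CNOS".toList.contains c
       | none => false) := by
  rw [← String.ofList_toList (s := t)]
  cases hl : t.toList with
  | nil => decide
  | cons c cs =>
    have ht : t = String.ofList (c :: cs) := by rw [← String.ofList_toList (s := t), hl]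
    rw [ht] at hbb
    have hbb2 : String.ofList (c :: cs) ∉ backboneAtoms := by simpa using hbb
    by_cases hc2 : ("CNOS".toList.contains c) = true
    · have hget : PySem.Str.pyGet? (String.ofList (c :: cs)) 0 = some c := by
        simp [PySem.Str.pyGet?_eq]
      rw [hget]
      split_ifs <;> simp_all
    · rw [Bool.not_eq_true] at hc2
      have hany : sidechainPrefixes.any (fun p => PySem.Str.startswith (String.ofList (c :: cs)) p) = false := by
        rw [List.any_eq_false]
        intro p hp
        simpa using startswith_false_of_head_ne c cs p hp hc2
      have hcb : ((String.ofList (c :: cs)) == "CB") = false := by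
        simp only [beq_eq_false_iff_ne, ne_eq]
        intro h
        have h2 := congrArg String.toList h
        simp at h2
        rw [h2.1] at hc2
        simp at hc2
      have hget : PySem.Str.pyGet? (String.ofList (c :: cs)) 0 = some c := by
        simp [PySem.Str.pyGet?_eq]
      rw [hany, hget, hcb]
      simp [hbb2]

theorem body_eq (a : String) :
    (if backboneAtoms.contains a then false
     else if PySem.Str.startswith a "H" && decide (PySem.Str.len a ≤ 2) then false
     else if sidechainPrefixes.any (fun p => PySem.Str.startswith a p) then true
     else if a == "CB" then true
     else if (match PySem.Str.pyGet? a 0 with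
              | some c => "CNOS".toList.contains c
              | none => false) && !backboneAtoms.contains a then true
     else false)
    = (if backboneAtoms.contains a then false
       else if PySem.Str.startswith a "H" && decide (PySem.Str.len a ≤ 2) then false
       else match PySem.Str.pyGet? a 0 with
            | some c => "CNOS".toList.contains c
            | none => false) := by
  by_cases h1 : backboneAtoms.contains a = true
  · rw [h1]
    simp
  · rw [Bool.not_eq_true] at h1
    rw [h1]
    by_cases h2 : (PySem.Str.startswith a "H" && decide (PySem.Str.len a ≤ 2)) = true
    · rw [h2]
      simp
    · rw [Bool.not_eq_true] at h2
      rw [h2]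
      have h3 := tail_eq a h1
      rw [h1] at h3
      simpa using h3

theorem core_eq (t : String) : is_sidechain_atom_alt t = is_sidechain_atom t := by
  unfold is_sidechain_atom is_sidechain_atom_alt
  exact (body_eq (PySem.Str.upper (PySem.Str.strip t))).symm

-- ===== VERDICT (by name: the statement is the Claim_ definition above) =====
theorem is_sidechain_atom_spec : Claim_equal_is_sidechain_atom := by
  intro a _ _
  show is_sidechain_atom a = is_sidechain_atom_alt a
  exact (core_eq a).symm
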